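-- pv_equiv track=rewrite | github.com/Hillard28/rapidgram | pregram.py | stn_phone
-- ===== SOURCE A (Python) =====
-- def stn_phone(target):
--     symbols = [
--         ",",
--         ".",
--         ":",
--         ";",
--         "(",
--         ")",
--         "*",
--         "\\",
--         "-",
--         "?",
--         "\'",
--         "\"",
--         "[",
--         "]",
--         "{",
--         "}",
--         "!",
--         "_",
--         "/",
--         "`",
--         "<",
--         ">"
--     ]
--
--     if type(target) is str:
--         # Convert to uppercase
--         retarget = target.upper()
--
--         # Remove symbols
--         for symbol in symbols:
--             retarget = retarget.replace(symbol, "")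
--
--         # Strip white space
--         retarget = retarget.strip()
--         retarget = "".join(retarget.split())
--
--         return retarget
--
--     else:
--         return target
-- ===== SOURCE B (Python) =====
-- SYMBOLS = set([",", ".", ":", ";", "(", ")", "*", "\\", "-", "?", "'", "\"",
--                "[", "]", "{", "}", "!", "_", "/", "`", "<", ">"])
--
--
-- def stn_phone(target):
--     if type(target) is str:
--         return "".join(c for c in target.upper()
--                        if c not in SYMBOLS and not c.isspace())
--     else:
--         return target
-- ===== Notes on version B (the rewrite author's own statement) =====
-- stated objective: simpler
-- what changed: Replaces the 22 sequential str.replace passes plus strip/split/join with a single character-filtering pass over the uppercased string using a symbol set and c.isspace().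
import Mathlib
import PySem

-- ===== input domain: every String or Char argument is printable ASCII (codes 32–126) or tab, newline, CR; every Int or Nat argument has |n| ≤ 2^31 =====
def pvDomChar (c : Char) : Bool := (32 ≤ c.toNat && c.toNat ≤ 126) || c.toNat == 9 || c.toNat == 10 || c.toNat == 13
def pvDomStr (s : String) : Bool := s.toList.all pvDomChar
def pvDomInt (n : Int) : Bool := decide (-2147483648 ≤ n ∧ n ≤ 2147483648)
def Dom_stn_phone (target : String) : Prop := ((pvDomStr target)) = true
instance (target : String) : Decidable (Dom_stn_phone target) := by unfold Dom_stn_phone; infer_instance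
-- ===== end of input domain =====

-- B replaces A's 22 sequential .replace passes plus strip/split/join with a single
-- character-filtering pass over the uppercased string (objective: simpler).


-- ===== PORT A =====
-- literal port of A's str branch (a Lean String is always a Python str, so the
-- 'type(target) is str' test is always true and the else branch is unreachable)
def stn_phone (target : String) : String :=
  let symbols : List String :=
    [",", ".", ":", ";", "(", ")", "*", "\\", "-", "?", "'", "\"",
     "[", "]", "{", "}", "!", "_", "/", "`", "<", ">"]
  let retarget := PySem.Str.upper target
  let retarget := symbols.foldl (fun r sym => PySem.Str.replace r sym "") retarget
  let retarget := PySem.Str.strip retarget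
  PySem.Str.join "" (PySem.Str.split₀ retarget)

-- ===== PORT B =====
def pvSymbolSet : PySem.Set Char :=
  PySem.Set.ofList
    [',', '.', ':', ';', '(', ')', '*', '\\', '-', '?', '\'', '"',
     '[', ']', '{', '}', '!', '_', '/', '`', '<', '>']

def stn_phone_alt (target : String) : String :=
  String.ofList ((PySem.Str.upper target).toList.filter
    (fun c => !(PySem.Set.contains pvSymbolSet c) && !(PySem.Chars.isspace c)))

-- ===== PRECONDITION & SPEC =====
def Spec_stn_phone (target : String) (out : String) : Prop := out = stn_phone_alt target
instance (target : String) (out : String) : Decidable (Spec_stn_phone target out) := by unfold Spec_stn_phone; infer_instance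

-- ===== CLAIM (what is proved, stated in full; the proofs are below) =====
def Claim_equal_stn_phone : Prop := ∀ (target : String), Dom_stn_phone target → Spec_stn_phone target (stn_phone target)

-- ===== LEMMAS AND PROOFS =====

-- replace with a one-char pattern and empty replacement is a filter
theorem replace_go_single (c : Char) :
    ∀ (fuel : Nat) (l acc : List Char), l.length ≤ fuel →
      PySem.Chars.replace.go [c] [] fuel l acc
        = acc.reverse ++ l.filter (fun x => !(x == c)) := by
  intro fuel
  induction fuel with
  | zero =>
    intro l acc h
    cases l with
    | nil => simp [PySem.Chars.replace.go]
    | cons a t => simp at h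
  | succ n ih =>
    intro l acc h
    cases l with
    | nil => simp [PySem.Chars.replace.go]
    | cons a t =>
      by_cases hc : a = c
      · subst hc
        have hp : [a].isPrefixOf (a :: t) = true := by simp [List.isPrefixOf]
        simp only [PySem.Chars.replace.go, hp, if_pos]
        have := ih t acc (by simpa using Nat.le_of_succ_le_succ h)
        simpa using this
      · have hp : [c].isPrefixOf (a :: t) = false := by
          simp [List.isPrefixOf]; exact fun h' => hc h'.symm
        simp only [PySem.Chars.replace.go, hp, Bool.false_eq_true, if_neg, not_false_iff]
        rw [ih t (a :: acc) (by simpa using Nat.le_of_succ_le_succ h)]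
        simp [hc]

theorem replace_single (c : Char) (s : List Char) :
    PySem.Chars.replace s [c] [] = s.filter (fun x => !(x == c)) := by
  simp only [PySem.Chars.replace]
  rw [if_neg (by simp)]
  simpa using replace_go_single c s.length s [] (le_refl _)

-- the sequential replace loop is one filter against the symbol list
theorem foldl_replace_filter (syms : List Char) :
    ∀ (s : List Char),
      syms.foldl (fun r c => PySem.Chars.replace r [c] []) s
        = s.filter (fun x => !(syms.contains x)) := by
  induction syms with
  | nil => intro s; simp
  | cons c cs ih =>
    intro s
    simp only [List.foldl_cons]
    rw [ih, replace_single, List.filter_filter]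
    apply List.filter_congr
    intro x _
    by_cases hx : x = c
    · simp [hx]
    · simp [hx]

-- ''.join of a whitespace-split is a whitespace filter
theorem flatten_split₀_go :
    ∀ (l cur : List Char) (accs : List (List Char)),
      (PySem.Chars.split₀.go l cur accs).flatten
        = accs.reverse.flatten ++ cur.reverse ++ l.filter (fun c => !(PySem.Chars.isspace c)) := by
  intro l
  induction l with
  | nil =>
    intro cur accs
    by_cases hc : cur.isEmpty
    · simp_all [PySem.Chars.split₀.go, List.isEmpty_iff]
    · simp [PySem.Chars.split₀.go, hc]
  | cons a t ih =>
    intro cur accs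
    by_cases hs : PySem.Chars.isspace a
    · by_cases hc : cur.isEmpty
      · have := ih [] accs
        simp_all [PySem.Chars.split₀.go, List.isEmpty_iff]
      · simp only [PySem.Chars.split₀.go, hs, if_pos, hc, Bool.false_eq_true, if_neg,
          not_false_iff]
        rw [ih [] (cur.reverse :: accs)]
        simp [hs]
    · simp only [PySem.Chars.split₀.go, hs, Bool.false_eq_true, if_neg, not_false_iff]
      rw [ih (a :: cur) accs]
      simp [hs]

theorem flatten_intersperse_nil (xss : List (List Char)) :
    (List.intersperse [] xss).flatten = xss.flatten := by
  induction xss with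
  | nil => rfl
  | cons x xs ih =>
    cases xs with
    | nil => rfl
    | cons y ys => simp_all [List.intersperse]

theorem join_split₀ (s : List Char) :
    PySem.Chars.join [] (PySem.Chars.split₀ s)
      = s.filter (fun c => !(PySem.Chars.isspace c)) := by
  have h := flatten_split₀_go s [] []
  simp only [PySem.Chars.join, List.intercalate, flatten_intersperse_nil,
    PySem.Chars.split₀]
  simpa using h

-- filtering out whitespace ignores a strip
theorem filter_dropWhile_isspace (l : List Char) :
    (l.dropWhile PySem.Chars.isspace).filter (fun c => !(PySem.Chars.isspace c))
      = l.filter (fun c => !(PySem.Chars.isspace c)) := by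
  induction l with
  | nil => rfl
  | cons a t ih =>
    by_cases hs : PySem.Chars.isspace a
    · simp [List.dropWhile, hs, ih]
    · simp [List.dropWhile, hs]

theorem filter_strip_isspace (l : List Char) :
    (PySem.Chars.strip l).filter (fun c => !(PySem.Chars.isspace c))
      = l.filter (fun c => !(PySem.Chars.isspace c)) := by
  simp only [PySem.Chars.strip, PySem.Chars.rstrip, PySem.Chars.lstrip]
  rw [List.filter_reverse, filter_dropWhile_isspace, List.filter_reverse,
    List.reverse_reverse, filter_dropWhile_isspace]

-- A's 22-replace String foldl, on the character level
theorem foldl_str_replace (u : String) :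
    (([",", ".", ":", ";", "(", ")", "*", "\\", "-", "?", "'", "\"",
       "[", "]", "{", "}", "!", "_", "/", "`", "<", ">"] : List String).foldl
        (fun r sym => PySem.Str.replace r sym "") u).toList
      = u.toList.filter (fun x =>
          !(([',', '.', ':', ';', '(', ')', '*', '\\', '-', '?', '\'', '"',
              '[', ']', '{', '}', '!', '_', '/', '`', '<', '>'] : List Char).contains x)) := by
  have h := foldl_replace_filter
    [',', '.', ':', ';', '(', ')', '*', '\\', '-', '?', '\'', '"',
     '[', ']', '{', '}', '!', '_', '/', '`', '<', '>'] u.toList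
  simp only [List.foldl_cons, List.foldl_nil] at h ⊢
  simp only [PySem.Str.toList_replace]
  exact h

-- ===== VERDICT (by name: the statement is the Claim_ definition above) =====
theorem stn_phone_spec : Claim_equal_stn_phone := by
  intro target _
  unfold Spec_stn_phone stn_phone stn_phone_alt
  apply String.toList_inj.mp
  simp only [PySem.Str.toList_join]
  rw [show ("" : String).toList = [] from rfl]
  rw [PySem.Str.split₀_map_toList, join_split₀, PySem.Str.toList_strip,
    filter_strip_isspace, foldl_str_replace]
  rw [List.filter_filter]
  simp only [String.toList_ofList, PySem.Str.toList_upper]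
  apply List.filter_congr
  intro x _
  rw [show pvSymbolSet = [',', '.', ':', ';', '(', ')', '*', '\\', '-', '?', '\'', '"',
        '[', ']', '{', '}', '!', '_', '/', '`', '<', '>'] from by decide]
  simp [Bool.and_comm]
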